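-- pv_equiv track=rewrite | github.com/strubelab/CoolerCodonOpt | scripts/codonopt.py | detect_ATA_ATA
-- ===== SOURCE A (Python) =====
-- def detect_ATA_ATA(sequence):
--     """
--     Detects the presence of two consecutive ATA codons in the given DNA sequence
--
--     Input
--     -----
--     sequence : str
--     """
--
--     codon_positions = list(range(0,len(sequence), 3))
--     consecutive_ATA = 0
--
--     for index in codon_positions:
--         icodon = sequence[index:index+3]
--
--         if icodon == 'ATA':
--
--             if index+3 < len(sequence):
--                 jcodon = sequence[index+3:index+6]
--
--                 if jcodon == 'ATA':
--                     return True
--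
--     return False
-- ===== SOURCE B (Python) =====
-- def detect_ATA_ATA(sequence):
--     """
--     Detects the presence of two consecutive ATA codons in the given DNA sequence
--
--     Input
--     -----
--     sequence : str
--     """
--     codons = []
--     rest = sequence
--     while rest:
--         codons.append(rest[:3])
--         rest = rest[3:]
--     return any(a == 'ATA' and b == 'ATA' for a, b in zip(codons, codons[1:]))
-- ===== Notes on version B (the rewrite author's own statement) =====
-- stated objective: simpler
-- what changed: B first splits the sequence into the codon list by repeatedly stripping a 3-char prefix, then checks adjacent pairs with any/zip, instead of A's single indexed pass with index+3 lookahead slices and a guarded inner branch.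
import Mathlib
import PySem

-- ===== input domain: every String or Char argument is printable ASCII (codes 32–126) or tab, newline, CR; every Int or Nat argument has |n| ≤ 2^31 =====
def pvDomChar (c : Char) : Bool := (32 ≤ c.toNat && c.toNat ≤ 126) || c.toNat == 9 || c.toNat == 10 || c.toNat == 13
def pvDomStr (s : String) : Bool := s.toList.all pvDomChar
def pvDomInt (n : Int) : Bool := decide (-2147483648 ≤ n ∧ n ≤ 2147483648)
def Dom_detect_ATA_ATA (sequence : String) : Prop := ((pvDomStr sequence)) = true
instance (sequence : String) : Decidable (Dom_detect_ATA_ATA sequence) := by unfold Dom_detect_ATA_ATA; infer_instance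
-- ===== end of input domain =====

-- B change, one line: B splits the sequence into the codon list by stripping 3-char prefixes,
-- then scans adjacent pairs with any/zip — a simpler two-phase decomposition of A's indexed lookahead loop.

-- ===== PORT A =====
-- the for-loop over list(range(0, len, 3)) with early return True
def detect_ATA_ATA_loop (s : List Char) : List Int → Bool
  | [] => false
  | index :: rest =>
    let icodon := PySem.List.slice s (some index) (some (index + 3))
    if icodon = ['A', 'T', 'A'] then
      if index + 3 < (s.length : Int) then
        let jcodon := PySem.List.slice s (some (index + 3)) (some (index + 6))
        if jcodon = ['A', 'T', 'A'] then true
        else detect_ATA_ATA_loop s rest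
      else detect_ATA_ATA_loop s rest
    else detect_ATA_ATA_loop s rest

def detect_ATA_ATA (sequence : String) : Bool :=
  detect_ATA_ATA_loop sequence.toList
    (PySem.List.pyRange 0 (sequence.toList.length : Int) 3)

-- ===== PORT B =====
-- the while-loop: append rest[:3], rest = rest[3:]
def detect_ATA_ATA_chunks (l : List Char) : List (List Char) :=
  if l = [] then [] else l.take 3 :: detect_ATA_ATA_chunks (l.drop 3)
termination_by l.length
decreasing_by
  cases l with
  | nil => simp_all
  | cons a t => simp

def detect_ATA_ATA_alt (sequence : String) : Bool :=
  let codons := detect_ATA_ATA_chunks sequence.toList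
  (codons.zip codons.tail).any fun p => p.1 == ['A', 'T', 'A'] && p.2 == ['A', 'T', 'A']

-- ===== PRECONDITION & SPEC =====
def Spec_detect_ATA_ATA (sequence : String) (out : Bool) : Prop := out = detect_ATA_ATA_alt sequence
instance (sequence : String) (out : Bool) : Decidable (Spec_detect_ATA_ATA sequence out) := by unfold Spec_detect_ATA_ATA; infer_instance

-- ===== CLAIM (what is proved, stated in full; the proofs are below) =====
def Claim_equal_detect_ATA_ATA : Prop := ∀ (sequence : String), Dom_detect_ATA_ATA sequence → Spec_detect_ATA_ATA sequence (detect_ATA_ATA sequence)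

-- ===== LEMMAS AND PROOFS =====

-- pair scan of B, as a named function for the proof
def pvAnyPair (cs : List (List Char)) : Bool :=
  (cs.zip cs.tail).any fun p => p.1 == ['A', 'T', 'A'] && p.2 == ['A', 'T', 'A']

lemma pyRange3_nil (a b : Int) (h : b ≤ a) : PySem.List.pyRange a b 3 = [] := by
  rw [PySem.List.pyRange_of_pos _ _ (by norm_num)]
  simp [if_neg (not_lt.mpr h)]

lemma pyRange3_cons (a b : Int) (h : a < b) :
    PySem.List.pyRange a b 3 = a :: PySem.List.pyRange (a + 3) b 3 := by
  rw [PySem.List.pyRange_of_pos _ _ (by norm_num : (0:Int) < 3),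
      PySem.List.pyRange_of_pos _ _ (by norm_num : (0:Int) < 3)]
  by_cases h3 : a + 3 < b
  · have hn : ((b - a + 3 - 1) / 3).toNat = ((b - (a + 3) + 3 - 1) / 3).toNat + 1 := by omega
    rw [if_pos h, if_pos h3, hn, List.range_succ_eq_map]
    simp only [List.map_cons, List.map_map, Nat.cast_zero, mul_zero, add_zero]
    congr 1
    apply List.map_congr_left
    intro k _
    simp only [Function.comp_apply, Nat.succ_eq_add_one]
    push_cast
    ring
  · have hn : ((b - a + 3 - 1) / 3).toNat = 1 := by omega
    rw [if_pos h, if_neg h3, hn]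
    simp

lemma pvAnyPair_cons_cons (x y : List Char) (t : List (List Char)) :
    pvAnyPair (x :: y :: t)
      = ((x == ['A','T','A'] && y == ['A','T','A']) || pvAnyPair (y :: t)) := by
  simp [pvAnyPair]

lemma key (s : List Char) (i : Nat) :
    detect_ATA_ATA_loop s (PySem.List.pyRange (i : Int) (s.length : Int) 3)
      = pvAnyPair (detect_ATA_ATA_chunks (s.drop i)) := by
  by_cases hle : s.length ≤ i
  · rw [pyRange3_nil _ _ (by exact_mod_cast hle), List.drop_eq_nil_iff.mpr hle]
    simp [detect_ATA_ATA_loop, detect_ATA_ATA_chunks, pvAnyPair]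
  · push Not at hle
    rw [pyRange3_cons _ _ (by exact_mod_cast hle)]
    have hrec := key s (i + 3)
    push_cast at hrec
    have hti : ((i : Int)).toNat = i := by omega
    have hti3 : ((i : Int) + 3).toNat = i + 3 := by omega
    have hti6 : ((i : Int) + 6).toNat = i + 6 := by omega
    have hic : PySem.List.slice s (some (i : Int)) (some ((i : Int) + 3))
        = (s.drop i).take 3 := by
      rw [PySem.List.slice_toNat, hti, hti3]
      · simp
      · positivity
      · positivity
    have hjc : PySem.List.slice s (some ((i : Int) + 3)) (some ((i : Int) + 6))
        = (s.drop (i + 3)).take 3 := by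
      rw [PySem.List.slice_toNat, hti3, hti6]
      · have h36 : i + 6 - (i + 3) = 3 := by omega
        rw [h36]
      · positivity
      · positivity
    have hdd : (s.drop i).drop 3 = s.drop (i + 3) := List.drop_drop
    have hne : s.drop i ≠ [] := by
      simp [List.drop_eq_nil_iff]
      omega
    rw [show detect_ATA_ATA_chunks (s.drop i)
          = (s.drop i).take 3 :: detect_ATA_ATA_chunks (s.drop (i + 3)) by
        rw [detect_ATA_ATA_chunks, if_neg hne, hdd]]
    simp only [detect_ATA_ATA_loop, hic, hjc]
    by_cases hd : s.length ≤ i + 3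
    · have hnil : s.drop (i + 3) = [] := List.drop_eq_nil_iff.mpr hd
      have hguard : ¬ ((i : Int) + 3 < (s.length : Int)) := by
        intro h
        omega
      rw [if_neg hguard, hrec, hnil]
      simp [detect_ATA_ATA_chunks, pvAnyPair]
    · push Not at hd
      have hnil : s.drop (i + 3) ≠ [] := by
        simp [List.drop_eq_nil_iff]
        omega
      have hguard : (i : Int) + 3 < (s.length : Int) := by
        exact_mod_cast hd
      rw [if_pos hguard, hrec,
          show detect_ATA_ATA_chunks (s.drop (i + 3))
              = (s.drop (i + 3)).take 3 :: detect_ATA_ATA_chunks ((s.drop (i + 3)).drop 3) by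
            rw [detect_ATA_ATA_chunks, if_neg hnil],
          pvAnyPair_cons_cons]
      by_cases h1 : (s.drop i).take 3 = ['A','T','A'] <;>
        by_cases h2 : (s.drop (i + 3)).take 3 = ['A','T','A'] <;>
        simp [h1, h2]
termination_by s.length - i

-- ===== VERDICT (by name: the statement is the Claim_ definition above) =====
theorem detect_ATA_ATA_spec : Claim_equal_detect_ATA_ATA := by
  intro s _
  unfold Spec_detect_ATA_ATA detect_ATA_ATA detect_ATA_ATA_alt
  have h := key s.toList 0
  simpa [pvAnyPair] using h
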